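-- pv_equiv track=rewrite | github.com/gideo/CodeWars | 7kyu_YogaClass.py | yoga
-- ===== SOURCE A (Python) =====
-- def yoga(classroom, poses):
--     res = 0
--     sm = [sum(i) for i in classroom]
--     for i, row in enumerate(classroom):
--         for s in row:
--             for pose in poses:
--                 if s + sm[i] >= pose: res += 1
--     return res
-- ===== SOURCE B (Python) =====
-- def yoga(classroom, poses):
--     sp = sorted(poses)
--     n = len(sp)
--
--     def count_le(x):
--         # number of poses <= x, by binary search on the sorted list
--         lo, hi = 0, n
--         while lo < hi:
--             mid = (lo + hi) // 2
--             if sp[mid] <= x: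
--                 lo = mid + 1
--             else:
--                 hi = mid
--         return lo
--
--     res = 0
--     for row in classroom:
--         t = sum(row)
--         for s in row:
--             res += count_le(s + t)
--     return res
-- ===== Notes on version B (the rewrite author's own statement) =====
-- stated objective: faster
-- what changed: B sorts the poses once and, for each element, counts matching poses with a binary search instead of scanning the whole pose list per element; the precomputed sum list is also dropped in favour of one row sum per row.
import Mathlib
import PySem

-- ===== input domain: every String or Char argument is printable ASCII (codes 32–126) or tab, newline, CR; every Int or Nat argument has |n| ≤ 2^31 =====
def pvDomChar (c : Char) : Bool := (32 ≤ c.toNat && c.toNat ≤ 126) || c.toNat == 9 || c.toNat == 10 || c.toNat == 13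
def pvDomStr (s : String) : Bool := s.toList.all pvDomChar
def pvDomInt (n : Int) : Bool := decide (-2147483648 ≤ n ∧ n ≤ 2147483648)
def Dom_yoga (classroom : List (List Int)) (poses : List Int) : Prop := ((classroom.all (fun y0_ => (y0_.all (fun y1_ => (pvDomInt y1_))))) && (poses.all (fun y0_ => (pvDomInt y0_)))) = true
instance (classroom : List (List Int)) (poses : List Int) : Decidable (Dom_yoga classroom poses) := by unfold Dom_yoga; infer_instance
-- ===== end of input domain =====

-- B sorts the poses once and counts matching poses per element by binary search (faster); A scans all poses for every element.

-- ===== PORT A =====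
def yoga (classroom : List (List Int)) (poses : List Int) : Int :=
  let sm := classroom.map (fun i => i.sum)
  (PySem.List.enumerate classroom).foldl (fun res irow =>
    irow.2.foldl (fun res s =>
      poses.foldl (fun res pose =>
        if s + PySem.List.pyGetD sm irow.1 0 ≥ pose then res + 1 else res) res) res) 0

-- ===== PORT B =====
-- hand-written binary search loop from Source B, as structural recursion on the fuel hi - lo
-- (each iteration shrinks hi - lo by at least one, so the fuel only guards totality)
def yogaCountLeGo (sp : List Int) (x : Int) : Nat → Nat → Nat → Nat
  | 0, lo, _ => lo
  | fuel + 1, lo, hi =>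
    if lo < hi then
      let mid := (lo + hi) / 2
      if PySem.List.pyGetD sp (mid : Int) 0 ≤ x then yogaCountLeGo sp x fuel (mid + 1) hi
      else yogaCountLeGo sp x fuel lo mid
    else lo

def yogaCountLe (sp : List Int) (x : Int) (lo hi : Nat) : Nat :=
  yogaCountLeGo sp x (hi - lo) lo hi

def yoga_alt (classroom : List (List Int)) (poses : List Int) : Int :=
  let sp := PySem.List.sorted poses (fun x => x) false
  let n := sp.length
  classroom.foldl (fun res row =>
    let t := row.sum
    row.foldl (fun res s => res + ((yogaCountLe sp (s + t) 0 n : Nat) : Int)) res) 0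

-- ===== PRECONDITION & SPEC =====
def Spec_yoga (classroom : List (List Int)) (poses : List Int) (out : Int) : Prop := out = yoga_alt classroom poses
instance (classroom : List (List Int)) (poses : List Int) (out : Int) : Decidable (Spec_yoga classroom poses out) := by unfold Spec_yoga; infer_instance

-- ===== CLAIM (what is proved, stated in full; the proofs are below) =====
def Claim_equal_yoga : Prop := ∀ (classroom : List (List Int)) (poses : List Int), Dom_yoga classroom poses → Spec_yoga classroom poses (yoga classroom poses)

-- ===== LEMMAS AND PROOFS =====

-- if exactly the first k positions of sp satisfy (· ≤ x), then countP (· ≤ x) = k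
theorem yoga_countP_split (sp : List Int) (x : Int) (k : Nat) (hk : k ≤ sp.length)
    (h1 : ∀ i (h : i < sp.length), i < k → sp[i] ≤ x)
    (h2 : ∀ i (h : i < sp.length), k ≤ i → x < sp[i]) :
    sp.countP (fun p => decide (p ≤ x)) = k := by
  induction sp generalizing k with
  | nil => simpa using hk.antisymm (Nat.zero_le k) |>.symm
  | cons a tl ih =>
    cases k with
    | zero =>
      have : ∀ p ∈ a :: tl, ¬ ((fun p => decide (p ≤ x)) p = true) := by
        intro p hp
        rcases List.mem_iff_getElem.1 hp with ⟨i, hi, rfl⟩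
        simpa using not_le.2 (h2 i hi (Nat.zero_le i))
      simpa using List.countP_eq_zero.2 this
    | succ k' =>
      have ha : a ≤ x := h1 0 (by simp) (Nat.succ_pos k')
      have : tl.countP (fun p => decide (p ≤ x)) = k' := by
        apply ih k' (by simpa using hk)
        · intro i hi hik
          have := h1 (i+1) (by simpa using Nat.succ_lt_succ hi) (Nat.succ_lt_succ hik)
          simpa using this
        · intro i hi hki
          have := h2 (i+1) (by simpa using Nat.succ_lt_succ hi) (Nat.succ_le_succ hki)
          simpa using this
      simp [ha, this]

theorem yoga_sorted_getElem_mono (sp : List Int) (hs : sp.Pairwise (· ≤ ·))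
    {i j : Nat} (hij : i ≤ j) (hj : j < sp.length) : sp[i]'(lt_of_le_of_lt hij hj) ≤ sp[j] := by
  rcases Nat.lt_or_ge i j with h | h
  · exact List.pairwise_iff_getElem.1 hs i j (lt_of_le_of_lt hij hj) hj h
  · have : i = j := le_antisymm hij h
    subst this; exact le_refl _

theorem yogaCountLeGo_spec (sp : List Int) (x : Int) (hs : sp.Pairwise (· ≤ ·)) :
    ∀ n lo hi, hi - lo ≤ n → lo ≤ hi → hi ≤ sp.length →
    (∀ i (h : i < sp.length), i < lo → sp[i] ≤ x) →
    (∀ i (h : i < sp.length), hi ≤ i → x < sp[i]) →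
    yogaCountLeGo sp x n lo hi = sp.countP (fun p => decide (p ≤ x)) := by
  intro n
  induction n with
  | zero =>
    intro lo hi hfuel hle hlen h1 h2
    have : lo = hi := by omega
    subst this
    rw [yogaCountLeGo]
    exact (yoga_countP_split sp x lo hlen h1 h2).symm
  | succ m ih =>
    intro lo hi hfuel hle hlen h1 h2
    rw [yogaCountLeGo]
    by_cases h : lo < hi
    · simp only [h, if_pos]
      have hmidlt : (lo + hi) / 2 < hi := by omega
      have hmidge : lo ≤ (lo + hi) / 2 := by omega
      have hmidlen : (lo + hi) / 2 < sp.length := lt_of_lt_of_le hmidlt hlen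
      rw [PySem.List.pyGetD_natCast, List.getD_eq_getElem _ _ hmidlen]
      by_cases hcmp : sp[(lo + hi) / 2] ≤ x
      · simp only [hcmp, if_pos]
        apply ih ((lo + hi) / 2 + 1) hi (by omega) (by omega) hlen
        · intro i hi' hik
          exact le_trans (yoga_sorted_getElem_mono sp hs (by omega) hmidlen) hcmp
        · exact h2
      · simp only [hcmp, if_neg, not_false_iff]
        apply ih lo ((lo + hi) / 2) (by omega) (by omega) (le_of_lt hmidlen)
        · exact h1
        · intro i hi' hki
          exact lt_of_lt_of_le (not_le.1 hcmp) (yoga_sorted_getElem_mono sp hs hki hi')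
    · simp only [h, if_neg, not_false_iff]
      have : lo = hi := by omega
      subst this
      exact (yoga_countP_split sp x lo hlen h1 h2).symm

theorem yogaCountLe_spec (sp : List Int) (x : Int) (hs : sp.Pairwise (· ≤ ·))
    (lo hi : Nat) (hle : lo ≤ hi) (hlen : hi ≤ sp.length)
    (h1 : ∀ i (h : i < sp.length), i < lo → sp[i] ≤ x)
    (h2 : ∀ i (h : i < sp.length), hi ≤ i → x < sp[i]) :
    yogaCountLe sp x lo hi = sp.countP (fun p => decide (p ≤ x)) :=
  yogaCountLeGo_spec sp x hs (hi - lo) lo hi (le_refl _) hle hlen h1 h2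

-- the binary search over the full sorted list counts the poses ≤ x
theorem yoga_count_eq (poses : List Int) (x : Int) :
    (yogaCountLe (PySem.List.sorted poses (fun x => x) false) x 0
      (PySem.List.sorted poses (fun x => x) false).length : Int)
      = poses.foldl (fun res pose => if x ≥ pose then res + 1 else res) 0 := by
  set sp := PySem.List.sorted poses (fun x => x) false with hsp
  have hs : sp.Pairwise (· ≤ ·) := by
    simpa using PySem.List.sorted_pairwise poses (fun x => x)
  have h := yogaCountLe_spec sp x hs 0 sp.length (Nat.zero_le _)
      (le_refl _) (by intro i h hik; omega) (by intro i h hik; omega)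
  rw [h]
  have hperm : sp.Perm poses := PySem.List.sorted_perm poses (fun x => x) false
  rw [hperm.countP_eq]
  rw [PySem.List.foldl_ite_add_one (fun pose => x ≥ pose) poses 0]
  simp [ge_iff_le]

theorem yoga_inner_eq (poses : List Int) (row : List Int) (t : Int) (res : Int) :
    row.foldl (fun res s =>
        poses.foldl (fun res pose => if s + t ≥ pose then res + 1 else res) res) res
    = row.foldl (fun res s => res + ((yogaCountLe (PySem.List.sorted poses (fun x => x) false)
        (s + t) 0 (PySem.List.sorted poses (fun x => x) false).length : Nat) : Int)) res := by
  apply PySem.List.foldl_congr_mem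
  intro acc s _
  rw [yoga_count_eq poses (s + t),
    PySem.List.foldl_ite_add_one (fun pose => s + t ≥ pose) poses acc,
    PySem.List.foldl_ite_add_one (fun pose => s + t ≥ pose) poses 0]
  ring

-- ===== VERDICT (by name: the statement is the Claim_ definition above) =====
theorem yoga_spec : Claim_equal_yoga := by
  intro classroom poses _
  unfold Spec_yoga yoga yoga_alt
  simp only
  -- replace the sm-lookup by the row's own sum, using the enumerate index
  rw [PySem.List.foldl_congr_mem (PySem.List.enumerate classroom)
      (g := fun res irow =>
        irow.2.foldl (fun res s => res + ((yogaCountLe (PySem.List.sorted poses (fun x => x) false)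
          (s + irow.2.sum) 0 (PySem.List.sorted poses (fun x => x) false).length : Nat) : Int)) res)]
  · -- fold over enumerate using only .2 = fold over the list itself
    conv_rhs => rw [← PySem.List.map_snd_enumerate classroom 0]
    rw [List.foldl_map]
  · intro acc irow hmem
    rcases (PySem.List.mem_enumerate_iff classroom 0 irow).1 hmem with ⟨k, hk, rfl⟩
    have hsm : PySem.List.pyGetD (classroom.map (fun i => i.sum)) ((0 : Int) + (k : Int)) 0
        = (classroom[k]).sum := by
      have : ((0 : Int) + (k : Int)) = ((k : Nat) : Int) := by omega
      rw [this, PySem.List.pyGetD_natCast]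
      rw [List.getD_eq_getElem _ _ (by simpa using hk)]
      simp
    simp only [hsm]
    exact yoga_inner_eq poses (classroom[k]) (classroom[k]).sum acc
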